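-- pv_equiv track=rewrite | github.com/ankitnitk/nokia-oss-xml-parser | 2g_tool/network.py | parent_dn
-- ===== SOURCE A (Python) =====
-- def parent_dn(dn, level):
--     parts = str(dn).split('/')
--     result = []
--     for part in parts:
--         result.append(part)
--         if part.upper().startswith(level.upper() + '-'):
--             break
--     return '/'.join(result)
-- ===== SOURCE B (Python) =====
-- def parent_dn(dn, level):
--     s = str(dn)
--     pre = level.upper() + '-'
--     if '/' in pre:
--         # no '/'-separated segment can start with a prefix that itself contains '/'
--         return s
--     u = s.upper()
--     if u.startswith(pre):
--         j = 0
--     else: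
--         k = u.find('/' + pre)
--         if k == -1:
--             return s
--         j = k + 1
--     end = s.find('/', j)
--     return s if end == -1 else s[:end]
-- ===== Notes on version B (the rewrite author's own statement) =====
-- stated objective: alternative
-- what changed: Instead of splitting on '/' and scanning the parts with an accumulate-and-break loop, B never splits: it uppercases the string once, locates the first matching segment start by a substring search for '/'+prefix (plus a startswith test for the first segment), finds the next '/' after it, and returns one slice of the original string.
import Mathlib
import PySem

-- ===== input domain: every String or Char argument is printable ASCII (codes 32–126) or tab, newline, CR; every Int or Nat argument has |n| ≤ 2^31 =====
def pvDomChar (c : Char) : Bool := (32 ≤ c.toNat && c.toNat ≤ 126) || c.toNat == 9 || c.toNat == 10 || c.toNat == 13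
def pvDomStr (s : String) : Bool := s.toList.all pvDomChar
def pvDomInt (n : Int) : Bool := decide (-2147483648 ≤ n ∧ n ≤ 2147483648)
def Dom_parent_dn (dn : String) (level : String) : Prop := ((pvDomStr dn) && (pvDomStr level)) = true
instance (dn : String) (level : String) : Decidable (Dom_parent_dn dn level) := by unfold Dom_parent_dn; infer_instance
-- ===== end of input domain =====

-- B locates the cut position by a case-insensitive substring search ('/' + prefix, plus a
-- startswith test for the first segment) on the raw string and returns one slice of it,
-- never splitting into parts; same linear cost, a different algorithm (objective: alternative).

-- ===== PORT A =====
-- the for-loop of A: append each part to result, break on the first prefix hit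
def parentDnLoopA (pre : String) : List String → List String → List String
  | [], result => result
  | part :: rest, result =>
    let result := result ++ [part]
    if PySem.Str.startswith (PySem.Str.upper part) pre then result
    else parentDnLoopA pre rest result

def parent_dn (dn : String) (level : String) : String :=
  let parts := (PySem.Str.split? dn "/").getD []
  PySem.Str.join "/" (parentDnLoopA (PySem.Str.upper level ++ "-") parts [])

-- ===== PORT B =====
-- Source B on code points: pre = level.upper()+'-'; '/' in pre → whole string; else find the
-- first segment start where pre matches case-insensitively (startswith at 0, else the first
-- occurrence of '/'+pre), and cut at the next '/' after it (none → whole string).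
def parentDnCut (p c : List Char) : List Char :=
  if PySem.Chars.isIn ['/'] p then c
  else
    let u := PySem.Chars.upper c
    let j? : Option Int :=
      if PySem.Chars.startswith u p then some 0
      else
        let k := PySem.Chars.find u ('/' :: p)
        if k = -1 then none else some (k + 1)
    match j? with
    | none => c
    | some j =>
      let e := PySem.Chars.findFrom c ['/'] j none
      if e = -1 then c else PySem.Chars.slice c none (some e)

def parent_dn_alt (dn : String) (level : String) : String :=
  String.ofList (parentDnCut ((PySem.Str.upper level).toList ++ ['-']) dn.toList)

-- ===== PRECONDITION & SPEC =====
def Spec_parent_dn (dn : String) (level : String) (out : String) : Prop := out = parent_dn_alt dn level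
instance (dn : String) (level : String) (out : String) : Decidable (Spec_parent_dn dn level out) := by unfold Spec_parent_dn; infer_instance

-- ===== CLAIM (what is proved, stated in full; the proofs are below) =====
def Claim_equal_parent_dn : Prop := ∀ (dn : String) (level : String), Dom_parent_dn dn level → Spec_parent_dn dn level (parent_dn dn level)

-- ===== LEMMAS AND PROOFS =====

-- str.split('/') as a plain structural recursion (cur is the current piece, reversed)
def pvSplitSlash : List Char → List Char → List (List Char)
  | [], cur => [cur.reverse]
  | c :: rest, cur =>
    if c = '/' then cur.reverse :: pvSplitSlash rest []
    else pvSplitSlash rest (c :: cur)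

theorem splitOn_go_eq (fuel : Nat) (l cur : List Char) (acc : List (List Char))
    (h : l.length < fuel) :
    PySem.Chars.splitOn.go ['/'] fuel l cur acc = acc.reverse ++ pvSplitSlash l cur := by
  induction l generalizing fuel cur acc with
  | nil =>
    cases fuel with
    | zero => omega
    | succ f => simp [PySem.Chars.splitOn.go, pvSplitSlash]
  | cons c rest ih =>
    cases fuel with
    | zero => omega
    | succ f =>
      by_cases hc : c = '/'
      · subst hc
        simp only [PySem.Chars.splitOn.go, List.isPrefixOf, Bool.and_true,
          beq_self_eq_true, ite_true, List.length_cons, List.length_nil,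
          List.drop_succ_cons, List.drop_zero] at *
        rw [ih f [] (cur.reverse :: acc) (by omega)]
        simp [pvSplitSlash]
      · have hpre : List.isPrefixOf ['/'] (c :: rest) = false := by
          simp [List.isPrefixOf]
          intro h'; exact absurd h'.symm hc
        simp only [PySem.Chars.splitOn.go, hpre, Bool.false_eq_true, ite_false]
        rw [ih f (c :: cur) acc (by simp at h ⊢; omega)]
        simp [pvSplitSlash, hc]

theorem splitOn_eq (l : List Char) :
    PySem.Chars.splitOn l ['/'] = pvSplitSlash l [] := by
  show PySem.Chars.splitOn.go ['/'] (l.length + 1) l [] [] = _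
  rw [splitOn_go_eq _ _ _ _ (by omega)]; simp

-- split? dn "/" at the String level
theorem split_slash_eq (dn : String) :
    (PySem.Str.split? dn "/").getD [] = (pvSplitSlash dn.toList []).map String.ofList := by
  show (Option.map (List.map String.ofList) (PySem.Chars.split? dn.toList "/".toList)).getD [] = _
  have : "/".toList = ['/'] := rfl
  rw [this]
  simp [PySem.Chars.split?, splitOn_eq]

-- the pieces of pvSplitSlash are '/'-free, the list is nonempty, and '/'-joining it restores the input
theorem pvSplitSlash_ne_nil (l cur : List Char) : pvSplitSlash l cur ≠ [] := by
  induction l generalizing cur with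
  | nil => simp [pvSplitSlash]
  | cons c rest ih => by_cases hc : c = '/' <;> simp [pvSplitSlash, hc, ih]

theorem pvSplitSlash_noslash (l cur : List Char) (hcur : '/' ∉ cur) :
    ∀ x ∈ pvSplitSlash l cur, '/' ∉ x := by
  induction l generalizing cur with
  | nil => simpa [pvSplitSlash] using hcur
  | cons c rest ih =>
    by_cases hc : c = '/'
    · subst hc
      simp only [pvSplitSlash, ite_true, List.mem_cons]
      rintro x (rfl | hx)
      · simpa using hcur
      · exact ih [] (by simp) x hx
    · simp only [pvSplitSlash, hc, ite_false]
      exact ih (c :: cur) (by simp [hcur, Ne.symm hc]) 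

theorem intercalate_cons_ne (sep x : List Char) (xs : List (List Char)) (h : xs ≠ []) :
    List.intercalate sep (x :: xs) = x ++ sep ++ List.intercalate sep xs := by
  obtain ⟨y, ys, rfl⟩ := List.exists_cons_of_ne_nil h
  simp [List.intercalate, List.intersperse]

theorem intercalate_pvSplitSlash (l cur : List Char) :
    List.intercalate ['/'] (pvSplitSlash l cur) = cur.reverse ++ l := by
  induction l generalizing cur with
  | nil => simp [pvSplitSlash, List.intercalate]
  | cons c rest ih =>
    by_cases hc : c = '/'
    · subst hc
      have hne := pvSplitSlash_ne_nil rest []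
      simp only [pvSplitSlash, ite_true]
      rw [intercalate_cons_ne _ _ _ hne, ih []]; simp
    · simp only [pvSplitSlash, hc, ite_false]
      rw [ih (c :: cur)]; simp

-- upperChar moves nothing onto or off '/'
theorem upperChar_ne_slash (x : Char) (hx : x ≠ '/') : PySem.Chars.upperChar x ≠ '/' := by
  unfold PySem.Chars.upperChar PySem.Chars.islower
  split
  · rename_i h
    simp only [Bool.and_eq_true, decide_eq_true_eq] at h
    intro he
    have h1 : 97 ≤ x.toNat := h.1
    have h2 : x.toNat ≤ 122 := h.2
    have hv : (x.toNat - 32).isValidChar := by constructor; omega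
    have h3 := congrArg Char.toNat he
    rw [Char.toNat_ofNat, if_pos hv] at h3
    have : x.toNat - 32 = 47 := h3
    omega
  · exact hx

theorem mem_slash_upper (l : List Char) : '/' ∈ PySem.Chars.upper l ↔ '/' ∈ l := by
  unfold PySem.Chars.upper
  simp only [List.mem_map]
  constructor
  · rintro ⟨x, hx, hux⟩
    by_cases h : x = '/'
    · subst h; exact hx
    · exact absurd hux (upperChar_ne_slash x h)
  · intro h; exact ⟨'/', h, by decide⟩

theorem upper_append (x y : List Char) :
    PySem.Chars.upper (x ++ y) = PySem.Chars.upper x ++ PySem.Chars.upper y := by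
  simp [PySem.Chars.upper]

theorem upper_cons_slash (y : List Char) :
    PySem.Chars.upper ('/' :: y) = '/' :: PySem.Chars.upper y := by
  simp [PySem.Chars.upper]; decide

theorem length_upper (x : List Char) : (PySem.Chars.upper x).length = x.length := by
  simp [PySem.Chars.upper]

theorem isIn_slash_iff (p : List Char) : PySem.Chars.isIn ['/'] p = true ↔ '/' ∈ p := by
  rw [PySem.Chars.isIn_iff_infix]
  constructor
  · intro h; exact h.sublist.subset (by simp)
  · intro h
    obtain ⟨s, t, rfl⟩ := List.append_of_mem h
    exact ⟨s, t, by simp⟩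

-- find s sub returns the position of the minimal occurrence
theorem find_eq_of_min (s sub : List Char) (q : Nat) (hq : sub <+: s.drop q)
    (hmin : ∀ i < q, ¬ sub <+: s.drop i) : PySem.Chars.find s sub = (q : Int) := by
  have hin : PySem.Chars.isIn sub s = true :=
    (PySem.Chars.exists_prefix_drop_iff_isIn sub s).1 ⟨q, hq⟩
  have hnn : 0 ≤ PySem.Chars.find s sub :=
    (PySem.Chars.find_nonneg_iff s sub).2 ((PySem.Chars.isIn_iff_infix sub s).1 hin)
  obtain ⟨h1, h2⟩ := PySem.Chars.find_spec hnn
  have ht : (PySem.Chars.find s sub).toNat = q := by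
    rcases lt_trichotomy (PySem.Chars.find s sub).toNat q with h | h | h
    · exact absurd h1 (hmin _ h)
    · exact h
    · exact absurd hq (h2 q h)
  omega

theorem find_eq_neg_one_of (s sub : List Char) (h : ∀ i, ¬ sub <+: s.drop i) :
    PySem.Chars.find s sub = -1 := by
  rw [PySem.Chars.find_eq_neg_one_iff]
  intro hinf
  obtain ⟨j, hj⟩ := (PySem.Chars.exists_prefix_drop_iff_isIn sub s).2
    ((PySem.Chars.isIn_iff_infix sub s).2 hinf)
  exact h j hj

-- a pattern starting with '/' has no occurrence inside the '/'-free block A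
theorem no_occ_in_block {A : List Char} (y p : List Char) (hA : '/' ∉ A)
    {i : Nat} (hi : i < A.length) : ¬ ('/' :: p) <+: (A ++ y).drop i := by
  intro h
  have h0 := h.getElem (i := 0) (by simp)
  have hlen : 0 < ((A ++ y).drop i).length := lt_of_lt_of_le (by simp) h.length_le
  simp only [List.getElem_cons_zero, List.getElem_drop] at h0
  have : (A ++ y)[i + 0]'(by simp at hlen ⊢; omega) = A[i]'hi := by
    simp only [Nat.add_zero]; exact List.getElem_append_left hi
  rw [this] at h0
  exact hA (h0 ▸ List.getElem_mem hi)

theorem find_slash_append (A y : List Char) (hA : '/' ∉ A) :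
    PySem.Chars.find (A ++ '/' :: y) ['/'] = (A.length : Int) := by
  apply find_eq_of_min
  · rw [List.drop_left]
    exact List.cons_prefix_cons.2 ⟨rfl, List.nil_prefix⟩
  · intro i hi h
    exact no_occ_in_block ('/' :: y) [] hA hi h

theorem find_slash_none (A : List Char) (hA : '/' ∉ A) :
    PySem.Chars.find A ['/'] = -1 := by
  apply find_eq_neg_one_of
  intro i h
  exact hA (h.sublist.subset (by simp) |> (List.mem_of_mem_drop ·))

theorem find_slashp_none (A p : List Char) (hA : '/' ∉ A) :
    PySem.Chars.find A ('/' :: p) = -1 := by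
  apply find_eq_neg_one_of
  intro i h
  exact hA (List.mem_of_mem_drop (h.sublist.subset (by simp)))

-- the central characterisation: first occurrence of '/'+p in A ++ '/' :: U', A slash-free
theorem find_slashp (A U' p : List Char) (hA : '/' ∉ A) :
    PySem.Chars.find (A ++ '/' :: U') ('/' :: p) =
      if List.isPrefixOf p U' then (A.length : Int)
      else if PySem.Chars.find U' ('/' :: p) = -1 then -1
      else (A.length : Int) + 1 + PySem.Chars.find U' ('/' :: p) := by
  split_ifs with h1 h2
  · apply find_eq_of_min
    · rw [List.drop_left, List.cons_prefix_cons]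
      exact ⟨rfl, List.isPrefixOf_iff_prefix.1 h1⟩
    · intro i hi; exact no_occ_in_block _ _ hA hi
  · apply find_eq_neg_one_of
    intro i h
    rcases lt_trichotomy i A.length with hi | hi | hi
    · exact no_occ_in_block _ _ hA hi h
    · subst hi
      rw [List.drop_left] at h
      rw [List.cons_prefix_cons] at h
      exact h1 (List.isPrefixOf_iff_prefix.2 h.2)
    · have hd : (A ++ '/' :: U').drop i = U'.drop (i - A.length - 1) := by
        rw [List.drop_append]
        have : A.drop i = [] := List.drop_eq_nil_of_le (by omega)
        rw [this, List.nil_append]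
        have : i - A.length = (i - A.length - 1) + 1 := by omega
        rw [this, List.drop_succ_cons]
        simp
      rw [hd] at h
      rw [PySem.Chars.find_eq_neg_one_iff] at h2
      exact h2 ((PySem.Chars.isIn_iff_infix _ _).1
        ((PySem.Chars.exists_prefix_drop_iff_isIn _ _).1 ⟨_, h⟩))
  · have hk : 0 ≤ PySem.Chars.find U' ('/' :: p) := by
      have := PySem.Chars.neg_one_le_find U' ('/' :: p); omega
    obtain ⟨hocc, hmink⟩ := PySem.Chars.find_spec hk
    have hcast : (A.length : Int) + 1 + PySem.Chars.find U' ('/' :: p) =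
        ((A.length + 1 + (PySem.Chars.find U' ('/' :: p)).toNat : Nat) : Int) := by
      push_cast; omega
    rw [hcast]
    apply find_eq_of_min
    · have hd : (A ++ '/' :: U').drop (A.length + 1 + (PySem.Chars.find U' ('/' :: p)).toNat)
          = U'.drop (PySem.Chars.find U' ('/' :: p)).toNat := by
        rw [List.drop_append]
        have h1' : A.drop (A.length + 1 + (PySem.Chars.find U' ('/' :: p)).toNat) = [] :=
          List.drop_eq_nil_of_le (by omega)
        rw [h1', List.nil_append]
        have : A.length + 1 + (PySem.Chars.find U' ('/' :: p)).toNat - A.length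
            = (PySem.Chars.find U' ('/' :: p)).toNat + 1 := by omega
        rw [this, List.drop_succ_cons]
      rw [hd]; exact hocc
    · intro i hi h
      rcases lt_trichotomy i A.length with hlt | heq | hgt
      · exact no_occ_in_block _ _ hA hlt h
      · subst heq
        rw [List.drop_left, List.cons_prefix_cons] at h
        exact h1 (List.isPrefixOf_iff_prefix.2 h.2)
      · have hd : (A ++ '/' :: U').drop i = U'.drop (i - A.length - 1) := by
          rw [List.drop_append]
          rw [List.drop_eq_nil_of_le (by omega : A.length ≤ i), List.nil_append]
          have : i - A.length = (i - A.length - 1) + 1 := by omega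
          rw [this, List.drop_succ_cons]
          simp
        rw [hd] at h
        exact hmink _ (by omega) h

-- A's loop result: the parts up to and including the first matching one
def pvTakeUpto (p : List Char) : List (List Char) → List (List Char)
  | [] => []
  | x :: xs => if List.isPrefixOf p (PySem.Chars.upper x) then [x] else x :: pvTakeUpto p xs

theorem pvTakeUpto_ne_nil (p : List Char) (x : List Char) (xs : List (List Char)) :
    pvTakeUpto p (x :: xs) ≠ [] := by
  by_cases h : List.isPrefixOf p (PySem.Chars.upper x) <;> simp [pvTakeUpto, h]

theorem pvTakeUpto_no_match (p : List Char) (parts : List (List Char))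
    (h : ∀ x ∈ parts, ¬ List.isPrefixOf p (PySem.Chars.upper x) = true) :
    pvTakeUpto p parts = parts := by
  induction parts with
  | nil => rfl
  | cons x xs ih =>
    have hx := h x (by simp)
    simp only [pvTakeUpto, eq_false hx]
    rw [if_neg (by simp), ih (fun y hy => h y (by simp [hy]))]

theorem loopA_toList (pre : String) (cps : List (List Char)) (acc : List String) :
    parentDnLoopA pre (cps.map String.ofList) acc
      = acc ++ (pvTakeUpto pre.toList cps).map String.ofList := by
  induction cps generalizing acc with
  | nil => simp [parentDnLoopA, pvTakeUpto]
  | cons x xs ih =>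
    have htest : PySem.Str.startswith (PySem.Str.upper (String.ofList x)) pre
        = List.isPrefixOf pre.toList (PySem.Chars.upper x) := by
      rw [PySem.Str.startswith_eq]
      unfold PySem.Chars.startswith
      rw [PySem.Str.toList_upper, String.toList_ofList]
    by_cases h : List.isPrefixOf pre.toList (PySem.Chars.upper x)
    · simp only [List.map_cons, parentDnLoopA]
      rw [htest, if_pos h]
      simp [pvTakeUpto, h]
    · simp only [List.map_cons, parentDnLoopA]
      rw [htest, if_neg (by simp [h]), ih]
      simp only [pvTakeUpto, if_neg (by simp [h] : ¬ (List.isPrefixOf pre.toList (PySem.Chars.upper x) = true))]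
      simp

theorem cut_eval (p c : List Char) (hIn : PySem.Chars.isIn ['/'] p = false) :
    parentDnCut p c =
      (if PySem.Chars.startswith (PySem.Chars.upper c) p then
         (if PySem.Chars.findFrom c ['/'] 0 none = -1 then c
          else PySem.Chars.slice c none (some (PySem.Chars.findFrom c ['/'] 0 none)))
       else if PySem.Chars.find (PySem.Chars.upper c) ('/' :: p) = -1 then c
       else
         (if PySem.Chars.findFrom c ['/']
              (PySem.Chars.find (PySem.Chars.upper c) ('/' :: p) + 1) none = -1 then c
          else PySem.Chars.slice c none
            (some (PySem.Chars.findFrom c ['/']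
              (PySem.Chars.find (PySem.Chars.upper c) ('/' :: p) + 1) none)))) := by
  unfold parentDnCut
  rw [if_neg (by simp [hIn])]
  by_cases h1 : PySem.Chars.startswith (PySem.Chars.upper c) p <;>
    by_cases h2 : PySem.Chars.find (PySem.Chars.upper c) ('/' :: p) = -1 <;>
      simp [h1, h2]

theorem drop_shift (a y : List Char) (t : Nat) :
    (a ++ '/' :: y).drop (a.length + 1 + t) = y.drop t := by
  rw [List.drop_append, List.drop_eq_nil_of_le (by omega), List.nil_append]
  have : a.length + 1 + t - a.length = t + 1 := by omega
  rw [this, List.drop_succ_cons]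

theorem take_shift (a y : List Char) (t : Nat) :
    (a ++ '/' :: y).take (a.length + 1 + t) = a ++ '/' :: y.take t := by
  rw [List.take_append, List.take_of_length_le (by omega)]
  have : a.length + 1 + t - a.length = t + 1 := by omega
  rw [this, List.take_succ_cons]

theorem not_prefix_big (p A y : List Char) (hp : '/' ∉ p) (h1 : ¬ p <+: A) :
    ¬ p <+: (A ++ '/' :: y) := by
  intro h
  by_cases hl : p.length ≤ A.length
  · apply h1
    rw [List.prefix_iff_eq_take] at h ⊢
    rw [h, List.take_append]
    have h0 : p.length - A.length = 0 := by omega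
    rw [h0]
    simp
  · have hlen : A.length < p.length := by omega
    have hg := h.getElem (i := A.length) hlen
    have hs : p[A.length]'hlen = '/' := by
      rw [hg, List.getElem_append_right (le_refl _)]
      simp
    exact hp (hs ▸ List.getElem_mem hlen)

-- B's cut on an intercalation of slash-free parts is A's truncated intercalation
theorem parentDnCut_main (p : List Char) (hp : '/' ∉ p) (parts : List (List Char))
    (hne : parts ≠ []) (hfree : ∀ x ∈ parts, '/' ∉ x) :
    parentDnCut p (List.intercalate ['/'] parts)
      = List.intercalate ['/'] (pvTakeUpto p parts) := by
  have hIn : PySem.Chars.isIn ['/'] p = false := by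
    rw [← Bool.not_eq_true, isIn_slash_iff]; exact hp
  induction parts with
  | nil => exact absurd rfl hne
  | cons a parts' ih =>
    have hfa : '/' ∉ a := hfree a (by simp)
    have hfa_u : '/' ∉ PySem.Chars.upper a := fun h => hfa ((mem_slash_upper a).1 h)
    by_cases hparts' : parts' = []
    · subst hparts'
      have hc : List.intercalate ['/'] [a] = a := by simp [List.intercalate]
      rw [hc]
      have hrhs : List.intercalate ['/'] (pvTakeUpto p [a]) = a := by
        by_cases ht : List.isPrefixOf p (PySem.Chars.upper a) <;>
          simp [pvTakeUpto, ht, List.intercalate]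
      rw [hrhs, cut_eval p a hIn]
      by_cases ht : List.isPrefixOf p (PySem.Chars.upper a)
      · rw [if_pos (by simpa [PySem.Chars.startswith] using ht)]
        simp only [PySem.Chars.findFrom_zero, find_slash_none a hfa, ite_true]
      · rw [if_neg (by simpa [PySem.Chars.startswith] using ht),
          if_pos (find_slashp_none (PySem.Chars.upper a) p hfa_u)]
    · have hfree' : ∀ x ∈ parts', '/' ∉ x := fun x hx => hfree x (by simp [hx])
      have hc : List.intercalate ['/'] (a :: parts')
          = a ++ '/' :: List.intercalate ['/'] parts' := by
        rw [intercalate_cons_ne _ _ _ hparts']; simp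
      set c' := List.intercalate ['/'] parts' with hc'def
      have hu : PySem.Chars.upper (a ++ '/' :: c')
          = PySem.Chars.upper a ++ '/' :: PySem.Chars.upper c' := by
        rw [upper_append, upper_cons_slash]
      have hlenu : (PySem.Chars.upper a).length = a.length := length_upper a
      rw [hc, cut_eval p _ hIn, hu]
      by_cases hta : List.isPrefixOf p (PySem.Chars.upper a)
      · -- the first part matches: both sides are a
        have hrhs : List.intercalate ['/'] (pvTakeUpto p (a :: parts')) = a := by
          simp [pvTakeUpto, hta, List.intercalate]
        rw [hrhs]
        rw [if_pos (show PySem.Chars.startswith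
            (PySem.Chars.upper a ++ '/' :: PySem.Chars.upper c') p = true from
          List.isPrefixOf_iff_prefix.2
            ((List.isPrefixOf_iff_prefix.1 hta).trans (List.prefix_append _ _)))]
        simp only [PySem.Chars.findFrom_zero, find_slash_append a c' hfa]
        rw [if_neg (by simp), PySem.Chars.slice_eq_listSlice, PySem.List.slice_to_natCast,
          List.take_left]
      · -- the first part does not match: peel it off and use the IH
        have hne' : pvTakeUpto p parts' ≠ [] := by
          obtain ⟨b, bs, rfl⟩ := List.exists_cons_of_ne_nil hparts'
          exact pvTakeUpto_ne_nil p b bs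
        have hrhs : List.intercalate ['/'] (pvTakeUpto p (a :: parts'))
            = a ++ '/' :: List.intercalate ['/'] (pvTakeUpto p parts') := by
          rw [show pvTakeUpto p (a :: parts') = a :: pvTakeUpto p parts' from by
              simp [pvTakeUpto, hta],
            intercalate_cons_ne _ _ _ hne']
          simp
        rw [hrhs, ← ih hparts' hfree', cut_eval p c' hIn]
        have hsw : ¬ p <+: (PySem.Chars.upper a ++ '/' :: PySem.Chars.upper c') :=
          not_prefix_big p _ _ hp (fun h => hta (List.isPrefixOf_iff_prefix.2 h))
        rw [if_neg (show ¬ PySem.Chars.startswith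
            (PySem.Chars.upper a ++ '/' :: PySem.Chars.upper c') p = true from
          fun h => hsw (List.isPrefixOf_iff_prefix.1 h))]
        rw [find_slashp _ _ _ hfa_u]
        by_cases h2 : List.isPrefixOf p (PySem.Chars.upper c')
        · -- the second segment matches: cut right after a ++ '/' ++ first piece of c'
          rw [if_pos h2, hlenu, if_neg (show ¬((a.length : Int) = -1) from by omega)]
          rw [if_pos (show PySem.Chars.startswith (PySem.Chars.upper c') p = true from h2)]
          have hj : ((a.length : Int) + 1) = ((a.length + 1 : Nat) : Int) := by push_cast; ring
          rw [hj, PySem.Chars.findFrom_natCast _ _ _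
            (by simp only [List.length_append, List.length_cons]; omega)]
          have hdrop : (a ++ '/' :: c').drop (a.length + 1) = c' := by
            have h0 := drop_shift a c' 0
            simp only [Nat.add_zero, List.drop_zero] at h0
            exact h0
          rw [hdrop, PySem.Chars.findFrom_zero]
          by_cases hf : PySem.Chars.find c' ['/'] = -1
          · simp [hf]
          · have hf0 : 0 ≤ PySem.Chars.find c' ['/'] := by
              have := PySem.Chars.neg_one_le_find c' ['/']; omega
            rw [if_neg hf, if_neg hf,
              if_neg (show ¬((↑(a.length + 1) : Int) + PySem.Chars.find c' ['/'] = -1) from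
                by omega)]
            have he : (↑(a.length + 1) : Int) + PySem.Chars.find c' ['/']
                = ((a.length + 1 + (PySem.Chars.find c' ['/']).toNat : Nat) : Int) := by
              push_cast; omega
            rw [he]
            rw [PySem.Chars.slice_eq_listSlice, PySem.Chars.slice_eq_listSlice,
              PySem.List.slice_to_natCast]
            have : PySem.List.slice c' none (some (PySem.Chars.find c' ['/']))
                = c'.take (PySem.Chars.find c' ['/']).toNat := by
              rw [← Int.toNat_of_nonneg hf0, PySem.List.slice_to_natCast,
                Int.toNat_of_nonneg hf0]
            rw [this]
            exact take_shift a c' (PySem.Chars.find c' ['/']).toNat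
        · rw [if_neg h2,
            if_neg (show ¬ PySem.Chars.startswith (PySem.Chars.upper c') p = true from h2)]
          by_cases hf2 : PySem.Chars.find (PySem.Chars.upper c') ('/' :: p) = -1
          · rw [if_pos hf2, if_pos hf2]
            simp
          · set k' := PySem.Chars.find (PySem.Chars.upper c') ('/' :: p) with hk'def
            have hk0 : 0 ≤ k' := by
              have := PySem.Chars.neg_one_le_find (PySem.Chars.upper c') ('/' :: p); omega
            have hocc := (PySem.Chars.find_spec (s := PySem.Chars.upper c')
              (sub := '/' :: p) hk0).1
            have hkb : k'.toNat + 1 ≤ c'.length := by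
              have hle := hocc.length_le
              simp only [List.length_cons, List.length_drop, length_upper] at hle
              have := List.IsPrefix.length_le hocc
              simp at this
              omega
            rw [if_neg hf2, if_neg (by omega), if_neg hf2, hlenu]
            have hj : ((a.length : Int) + 1 + k' + 1)
                = ((a.length + 2 + k'.toNat : Nat) : Int) := by push_cast; omega
            have hj' : (k' + 1) = ((k'.toNat + 1 : Nat) : Int) := by push_cast; omega
            rw [hj, hj', PySem.Chars.findFrom_natCast _ _ _
              (by simp only [List.length_append, List.length_cons]; omega),
              PySem.Chars.findFrom_natCast _ _ _ (by omega)]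
            have hdrop : (a ++ '/' :: c').drop (a.length + 2 + k'.toNat)
                = c'.drop (k'.toNat + 1) := by
              have := drop_shift a c' (k'.toNat + 1)
              rw [← this]; congr 1; omega
            rw [hdrop]
            by_cases hg : PySem.Chars.find (c'.drop (k'.toNat + 1)) ['/'] = -1
            · simp [hg]
            · have hg0 : 0 ≤ PySem.Chars.find (c'.drop (k'.toNat + 1)) ['/'] := by
                have := PySem.Chars.neg_one_le_find (c'.drop (k'.toNat + 1)) ['/']; omega
              rw [if_neg hg, if_neg hg,
                if_neg (show ¬((↑(a.length + 2 + k'.toNat) : Int)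
                  + PySem.Chars.find (c'.drop (k'.toNat + 1)) ['/'] = -1) from by omega),
                if_neg (show ¬((↑(k'.toNat + 1) : Int)
                  + PySem.Chars.find (c'.drop (k'.toNat + 1)) ['/'] = -1) from by omega)]
              set g := PySem.Chars.find (c'.drop (k'.toNat + 1)) ['/'] with hgdef
              have he1 : ((a.length + 2 + k'.toNat : Nat) : Int) + g
                  = ((a.length + 1 + (k'.toNat + 1 + g.toNat) : Nat) : Int) := by
                push_cast; omega
              have he2 : ((k'.toNat + 1 : Nat) : Int) + g
                  = ((k'.toNat + 1 + g.toNat : Nat) : Int) := by push_cast; omega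
              rw [he1, he2, PySem.Chars.slice_eq_listSlice, PySem.Chars.slice_eq_listSlice,
                PySem.List.slice_to_natCast, PySem.List.slice_to_natCast]
              exact take_shift a c' (k'.toNat + 1 + g.toNat)

-- ===== VERDICT (by name: the statement is the Claim_ definition above) =====
theorem parent_dn_spec : Claim_equal_parent_dn := by
  intro dn level _
  show parent_dn dn level = parent_dn_alt dn level
  unfold parent_dn parent_dn_alt
  rw [split_slash_eq]
  show PySem.Str.join "/" (parentDnLoopA (PySem.Str.upper level ++ "-")
      (List.map String.ofList (pvSplitSlash dn.toList [])) []) = _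
  rw [loopA_toList]
  have hpre : (PySem.Str.upper level ++ "-").toList
      = (PySem.Str.upper level).toList ++ ['-'] := by
    rw [String.toList_append]; rfl
  set p := (PySem.Str.upper level).toList ++ ['-'] with hpdef
  set CP := pvSplitSlash dn.toList [] with hCPdef
  have hdn : List.intercalate ['/'] CP = dn.toList := by
    have := intercalate_pvSplitSlash dn.toList []
    simpa using this
  have hjoin : PySem.Str.join "/" ([] ++ (pvTakeUpto (PySem.Str.upper level ++ "-").toList CP).map String.ofList)
      = String.ofList (List.intercalate ['/'] (pvTakeUpto p CP)) := by
    rw [hpre]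
    show String.ofList (PySem.Chars.join "/".toList
      (List.map String.toList (List.map String.ofList (pvTakeUpto p CP)))) = _
    congr 1
    rw [List.map_map]
    simp only [Function.comp_def, String.toList_ofList, List.map_id']
    rfl
  rw [hjoin]
  by_cases hp : '/' ∈ p
  · -- the prefix contains '/': no part can match, both sides return the whole string
    have hnm : ∀ x ∈ CP, ¬ List.isPrefixOf p (PySem.Chars.upper x) = true := by
      intro x hx h
      have : '/' ∈ PySem.Chars.upper x :=
        (List.isPrefixOf_iff_prefix.1 h).sublist.subset hp
      exact pvSplitSlash_noslash dn.toList [] (by simp) x hx ((mem_slash_upper x).1 this)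
    rw [pvTakeUpto_no_match p CP hnm, hdn]
    have hcut : parentDnCut p dn.toList = dn.toList := by
      unfold parentDnCut
      rw [if_pos (by rw [isIn_slash_iff]; exact hp)]
    rw [hcut]
  · rw [← hdn, parentDnCut_main p hp CP (pvSplitSlash_ne_nil _ _)
      (pvSplitSlash_noslash dn.toList [] (by simp))]
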